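-- pv_equiv track=rewrite | github.com/martinhenstridge/adventofcode2023 | aoc/day11.py | find_cumulative_empty
-- ===== SOURCE A (Python) =====
-- def find_cumulative_empty(charset):
--     empty = []
--     count = 0
--     for chars in charset:
--         empty.append(count)
--         if not any(char == "#" for char in chars):
--             count += 1
--     return empty
-- ===== SOURCE B (Python) =====
-- def _bisect_left(a, x):
--     lo, hi = 0, len(a)
--     while lo < hi:
--         mid = (lo + hi) // 2
--         if a[mid] < x:
--             lo = mid + 1
--         else:
--             hi = mid
--     return lo
--
--
-- def find_cumulative_empty(charset):
--     hash_rows = [i for i, chars in enumerate(charset) if "#" in chars]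
--     return [i - _bisect_left(hash_rows, i) for i in range(len(charset))]
-- ===== Notes on version B (the rewrite author's own statement) =====
-- stated objective: alternative
-- what changed: Instead of one forward loop with a running counter, B first collects the sorted list of indices of rows containing '#', then computes each output value as the closed form i - bisect_left(hash_rows, i) (i minus the number of non-empty rows before i) via a hand-written binary search.
import Mathlib
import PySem

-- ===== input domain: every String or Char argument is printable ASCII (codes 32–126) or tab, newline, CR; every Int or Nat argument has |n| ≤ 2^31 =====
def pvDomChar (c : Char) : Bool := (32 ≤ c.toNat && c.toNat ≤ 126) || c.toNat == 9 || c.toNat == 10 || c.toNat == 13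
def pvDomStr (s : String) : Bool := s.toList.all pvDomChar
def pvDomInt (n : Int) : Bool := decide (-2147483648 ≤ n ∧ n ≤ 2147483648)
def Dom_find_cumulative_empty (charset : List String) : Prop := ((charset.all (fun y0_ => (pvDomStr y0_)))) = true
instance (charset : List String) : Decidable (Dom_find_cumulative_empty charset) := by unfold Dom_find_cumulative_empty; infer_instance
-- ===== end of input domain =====

-- B replaces A's forward loop with a running counter by a different algorithm: collect the
-- sorted list of indices of rows containing '#', then each output value is the closed form
-- i - bisect_left(hash_rows, i), computed by a hand-written binary search (alternative, same order of cost).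

-- ===== PORT A =====
-- one loop carrying (empty, count); append count, then bump count if the row has no '#'
def find_cumulative_empty (charset : List String) : List Int :=
  (charset.foldl
    (fun (st : List Int × Int) chars =>
      (st.1 ++ [st.2],
       if ¬ (chars.toList.any (fun c => c == '#')) then st.2 + 1 else st.2))
    ([], 0)).1

-- ===== PORT B =====
-- hand-written bisect_left: while lo < hi: mid = (lo+hi)//2; if a[mid] < x: lo = mid+1 else hi = mid
-- (a[mid] is always in range when called with hi ≤ len a, so getD is exact here)
def pvBisectLeft (a : List Int) (x : Int) (lo hi : Nat) : Nat :=
  if lo < hi then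
    if a.getD ((lo + hi) / 2) 0 < x then pvBisectLeft a x ((lo + hi) / 2 + 1) hi
    else pvBisectLeft a x lo ((lo + hi) / 2)
  else lo
termination_by hi - lo
decreasing_by all_goals omega

def find_cumulative_empty_alt (charset : List String) : List Int :=
  let hash_rows : List Int :=
    ((PySem.List.enumerate charset 0).filter (fun p => p.2.toList.contains '#')).map (fun p => p.1)
  (PySem.List.pyRange 0 (charset.length : Int) 1).map
    (fun i => i - (pvBisectLeft hash_rows i 0 hash_rows.length : Int))

-- ===== PRECONDITION & SPEC =====
def Spec_find_cumulative_empty (charset : List String) (out : List Int) : Prop := out = find_cumulative_empty_alt charset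
instance (charset : List String) (out : List Int) : Decidable (Spec_find_cumulative_empty charset out) := by unfold Spec_find_cumulative_empty; infer_instance

-- ===== CLAIM (what is proved, stated in full; the proofs are below) =====
def Claim_equal_find_cumulative_empty : Prop := ∀ (charset : List String), Dom_find_cumulative_empty charset → Spec_find_cumulative_empty charset (find_cumulative_empty charset)

-- ===== LEMMAS AND PROOFS =====

-- A's loop unrolled: output k is the initial counter plus the number of empty rows before row k
theorem pvAloop_eq (cs : List String) (acc : List Int) (c : Int) :
    (cs.foldl
      (fun (st : List Int × Int) chars =>
        (st.1 ++ [st.2],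
         if ¬ (chars.toList.any (fun ch => ch == '#')) then st.2 + 1 else st.2))
      (acc, c)).1
    = acc ++ (List.range cs.length).map
        (fun k => c + ((cs.take k).countP (fun s => !(s.toList.any (fun ch => ch == '#'))) : Int)) := by
  induction cs generalizing acc c with
  | nil => simp
  | cons x xs ih =>
    simp only [List.foldl_cons]
    rw [ih, List.append_assoc]
    congr 1
    rw [List.length_cons, List.range_succ_eq_map, List.map_cons, List.map_map]
    simp only [List.take_zero, List.countP_nil, Int.natCast_zero, add_zero,
      List.singleton_append]
    congr 1
    apply List.map_congr_left
    intro k _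
    simp only [Function.comp, List.take_succ_cons, List.countP_cons]
    by_cases h : x.toList.any (fun ch => ch == '#') <;> simp [h] <;> ring

-- if P holds exactly on indices < m (for j < n), then countP over range n is m
theorem pvCountP_range_iff (P : Nat → Bool) (n m : Nat) (hm : m ≤ n)
    (h : ∀ j, j < n → (P j = true ↔ j < m)) : (List.range n).countP P = m := by
  induction n generalizing m with
  | zero => simp only [List.range_zero, List.countP_nil]; omega
  | succ n ih =>
    rw [List.range_succ, List.countP_append]
    by_cases hmn : m = n + 1
    · have hPn : P n = true := (h n (by omega)).mpr (by omega)
      rw [ih n (by omega) (fun j hj => ⟨fun _ => by omega, fun _ => (h j (by omega)).mpr (by omega)⟩)]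
      simp [hPn, hmn]
    · have hPn : P n = false := by
        have := h n (by omega)
        by_cases hp : P n = true
        · exact absurd ((this.mp hp)) (by omega)
        · simpa using hp
      rw [ih m (by omega) (fun j hj => h j (by omega))]
      simp [hPn]

-- binary-search invariant: with the predicate downward closed, bisect returns the boundary
theorem pvBisect_inv (a : List Int) (x : Int)
    (mono : ∀ j k : Nat, j ≤ k → k < a.length → a.getD j 0 ≤ a.getD k 0) :
    ∀ (d lo hi : Nat), hi - lo ≤ d → lo ≤ hi → hi ≤ a.length →
      (∀ j, j < lo → a.getD j 0 < x) →
      (∀ j, hi ≤ j → j < a.length → ¬ a.getD j 0 < x) →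
      pvBisectLeft a x lo hi
        = (List.range a.length).countP (fun j => decide (a.getD j 0 < x)) := by
  intro d
  induction d with
  | zero =>
    intro lo hi hd hlh hha h1 h2
    have : lo = hi := by omega
    subst this
    rw [pvBisectLeft]
    simp only [lt_irrefl, if_false]
    exact (pvCountP_range_iff _ _ _ (by omega)
      (fun j hj => ⟨fun hp => by
        by_contra hc
        exact h2 j (by omega) hj (by simpa using hp),
        fun hl => by simpa using h1 j hl⟩)).symm
  | succ d ih =>
    intro lo hi hd hlh hha h1 h2
    rw [pvBisectLeft]
    by_cases hlt : lo < hi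
    · simp only [hlt, if_true]
      by_cases hmid : a.getD ((lo + hi) / 2) 0 < x
      · simp only [hmid, if_true]
        exact ih ((lo + hi) / 2 + 1) hi (by omega) (by omega) hha
          (fun j hj => lt_of_le_of_lt (mono j ((lo + hi) / 2) (by omega) (by omega)) hmid) h2
      · simp only [hmid, if_false]
        exact ih lo ((lo + hi) / 2) (by omega) (by omega) (by omega) h1
          (fun j hj hjl => fun hc =>
            hmid (lt_of_le_of_lt (mono ((lo + hi) / 2) j hj hjl) hc))
    · simp only [hlt, if_false]
      have : lo = hi := by omega
      subst this
      exact (pvCountP_range_iff _ _ _ (by omega)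
        (fun j hj => ⟨fun hp => by
          by_contra hc
          exact h2 j (by omega) hj (by simpa using hp),
          fun hl => by simpa using h1 j hl⟩)).symm

-- indices-to-elements: counting over range with getD equals counting the elements
theorem pvMap_getD_range : ∀ (a : List Int),
    (List.range a.length).map (fun j => a.getD j 0) = a := by
  intro a
  induction a with
  | nil => simp
  | cons y ys ih =>
    simp only [List.length_cons, List.range_succ_eq_map, List.map_cons, List.map_map,
      List.getD_cons_zero]
    exact congrArg (y :: ·) (by simpa [Function.comp, List.getD_cons_succ] using ih)

theorem pvBisect_count (a : List Int) (x : Int) (h : a.Pairwise (· < ·)) :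
    pvBisectLeft a x 0 a.length = a.countP (fun y => decide (y < x)) := by
  have mono : ∀ j k : Nat, j ≤ k → k < a.length → a.getD j 0 ≤ a.getD k 0 := by
    intro j k hjk hk
    rcases Nat.lt_or_ge j k with hlt | hge
    · have := List.pairwise_iff_getElem.mp h j k (by omega) hk hlt
      rw [List.getD_eq_getElem a 0 (by omega), List.getD_eq_getElem a 0 hk]
      exact le_of_lt this
    · have : j = k := by omega
      subst this; rfl
  rw [pvBisect_inv a x mono (a.length) 0 a.length (by omega) (by omega) le_rfl
    (by omega) (fun j hj hjl => by omega)]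
  conv_rhs => rw [← pvMap_getD_range a]
  rw [List.countP_map]
  rfl

-- counting enumerated pairs whose index is below the cut: below the start it is 0 …
theorem pvCnt_enum_zero (q : String → Bool) :
    ∀ (cs : List String) (s t : Int), t ≤ s →
      (PySem.List.enumerate cs s).countP (fun p => q p.2 && decide (p.1 < t)) = 0 := by
  intro cs
  induction cs with
  | nil => intro s t _; simp [PySem.List.enumerate_nil]
  | cons y ys ih =>
    intro s t ht
    rw [PySem.List.enumerate_cons, List.countP_cons]
    have : ¬ (s < t) := by omega
    simp [this, ih (s + 1) t (by omega)]

-- … and in general it equals the count of flagged rows among the first k rows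
theorem pvCnt_enum (q : String → Bool) :
    ∀ (cs : List String) (s : Int) (k : Nat),
      (PySem.List.enumerate cs s).countP (fun p => q p.2 && decide (p.1 < s + k))
        = (cs.take k).countP q := by
  intro cs
  induction cs with
  | nil => intro s k; simp [PySem.List.enumerate_nil]
  | cons y ys ih =>
    intro s k
    rw [PySem.List.enumerate_cons, List.countP_cons]
    cases k with
    | zero =>
      simp [pvCnt_enum_zero q ys (s + 1) s (by omega)]
    | succ k =>
      have hs : s < s + 1 + (k : Nat) := by omega
      have harg : s + ((k + 1 : Nat) : Int) = (s + 1) + (k : Nat) := by push_cast; ring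
      rw [harg, ih (s + 1) k]
      simp [hs, List.countP_cons]

-- hash_rows is strictly increasing
theorem pvHash_sorted (cs : List String) :
    (((PySem.List.enumerate cs 0).filter (fun p => p.2.toList.contains '#')).map
      (fun p => p.1)).Pairwise (· < ·) := by
  rw [List.pairwise_map]
  exact (PySem.List.pairwise_lt_enumerate cs 0).filter _

-- a predicate and its negation count every element exactly once
theorem pvCountP_not {α : Type} (p : α → Bool) (l : List α) :
    l.countP p + l.countP (fun a => !p a) = l.length := by
  induction l with
  | nil => simp
  | cons y ys ih =>
    by_cases h : p y <;> simp [h] <;> omega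

-- counting hash_rows entries below k = number of '#'-rows among the first k rows
theorem pvHash_count (cs : List String) (k : Nat) :
    (((PySem.List.enumerate cs 0).filter (fun p => p.2.toList.contains '#')).map
      (fun p => p.1)).countP (fun y => decide (y < (k : Int)))
    = (cs.take k).countP (fun s => s.toList.contains '#') := by
  rw [List.countP_map, List.countP_filter,
    ← pvCnt_enum (fun s => s.toList.contains '#') cs 0 k]
  apply List.countP_congr
  intro p _
  simp [Function.comp, Bool.and_comm]

-- ===== VERDICT (by name: the statement is the Claim_ definition above) =====
theorem find_cumulative_empty_spec : Claim_equal_find_cumulative_empty := by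
  intro charset _
  unfold Spec_find_cumulative_empty find_cumulative_empty find_cumulative_empty_alt
  rw [pvAloop_eq charset [] 0, PySem.List.pyRange_zero_natCast, List.map_map]
  simp only [List.nil_append]
  apply List.map_congr_left
  intro k hk
  have hk' : k < charset.length := List.mem_range.mp hk
  rw [Function.comp]
  rw [pvBisect_count _ _ (pvHash_sorted charset)]
  rw [pvHash_count charset k]
  have hlen : (charset.take k).length = k := by simp [hk'.le]
  have hrw : (charset.take k).countP (fun s => !(s.toList.any (fun ch => ch == '#')))
      = (charset.take k).countP (fun s => !(s.toList.contains '#')) :=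
    List.countP_congr (fun s _ => by simp [List.any_beq'])
  have hsplit : (charset.take k).countP (fun s => s.toList.contains '#')
      + (charset.take k).countP (fun s => !(s.toList.contains '#')) = k := by
    rw [pvCountP_not, hlen]
  rw [hrw]
  omega
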